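-- pv_equiv track=rewrite | github.com/lum1n0us/opencode_configuration_xkm | skill/analyze-pr/scripts/analyze_pr.py | format_classification_summary
-- ===== SOURCE A (Python) =====
-- from collections import defaultdict
--
-- def format_classification_summary(file_classifications):
--     """Format the classification summary section"""
--     category_counts = defaultdict(int)
--
--     for classifications in file_classifications.values():
--         for category in classifications:
--             category_counts[category] += 1
--
--     if not category_counts:
--         return "No files classified."
--
--     summary_lines = []
--     for category, count in sorted(category_counts.items()):
--         category_name = category.replace("_", " ").title()
--         summary_lines.append(f"- **{category_name}**: {count} file(s)")
--
--     return "\n".join(summary_lines)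
-- ===== SOURCE B (Python) =====
-- from itertools import groupby
--
--
-- def format_classification_summary(file_classifications):
--     """Format the classification summary section"""
--     cats = sorted(c for lst in file_classifications.values() for c in lst)
--
--     if not cats:
--         return "No files classified."
--
--     return "\n".join(
--         f"- **{cat.replace('_', ' ').title()}**: {len(list(grp))} file(s)"
--         for cat, grp in groupby(cats)
--     )
-- ===== Notes on version B (the rewrite author's own statement) =====
-- stated objective: idiomatic
-- what changed: Replaces A's defaultdict counting loop followed by sorting the dict items with the idiomatic flatten / sort / itertools.groupby run-length scan: counts come from run lengths of the sorted flattened list, not from a hash map.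
import Mathlib
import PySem

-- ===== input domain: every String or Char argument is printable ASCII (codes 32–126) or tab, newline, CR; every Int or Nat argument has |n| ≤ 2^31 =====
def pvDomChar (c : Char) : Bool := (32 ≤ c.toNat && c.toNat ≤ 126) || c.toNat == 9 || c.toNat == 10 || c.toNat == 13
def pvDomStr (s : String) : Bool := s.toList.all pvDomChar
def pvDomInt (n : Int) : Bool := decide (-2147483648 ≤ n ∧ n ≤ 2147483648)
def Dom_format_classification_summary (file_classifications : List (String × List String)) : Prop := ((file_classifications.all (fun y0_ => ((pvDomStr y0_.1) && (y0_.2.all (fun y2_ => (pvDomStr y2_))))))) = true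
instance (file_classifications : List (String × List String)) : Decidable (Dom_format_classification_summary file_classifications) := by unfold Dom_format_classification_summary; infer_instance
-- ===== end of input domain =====

-- B replaces A's hash-map count + key sort by flatten / sort / group-runs (itertools.groupby); same output, idiomatic.

-- shared by both ports: str.title() (exact on the ASCII domain: a letter is uppercased
-- exactly when the previous char is not a letter, other letters are lowercased)
def pyTitleGo (prev : Bool) : List Char → List Char
  | [] => []
  | c :: cs =>
      (if PySem.Chars.isalpha c then
        (if prev then PySem.Chars.lowerChar c else PySem.Chars.upperChar c)
      else c) :: pyTitleGo (PySem.Chars.isalpha c) cs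

-- shared by both ports: the f-string "- **{category.replace('_',' ').title()}**: {count} file(s)"
def fmtLine (category : String) (count : Int) : String :=
  PySem.Str.join "" ["- **", String.ofList (pyTitleGo false (PySem.Str.replace category "_" " ").toList),
    "**: ", PySem.Int.toStr count, " file(s)"]

-- ===== PORT A =====
def format_classification_summary (file_classifications : List (String × List String)) : String :=
  let category_counts : PySem.Dict String Int :=
    file_classifications.foldl
      (fun d p => p.2.foldl (fun d category => d.modify category 0 (· + 1)) d) PySem.Dict.empty
  if category_counts.size = 0 then "No files classified."
  else
    let summary_lines :=
      (PySem.List.sorted2 category_counts.items Prod.fst Prod.snd).foldl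
        (fun acc p => acc ++ [fmtLine p.1 p.2]) []
    PySem.Str.join "\n" summary_lines

-- ===== PORT B =====
-- itertools.groupby on a list: successive runs of equal elements, with run lengths
def altRuns : List String → List (String × Int)
  | [] => []
  | x :: t => (x, 1 + ((t.takeWhile (· == x)).length : Int)) :: altRuns (t.dropWhile (· == x))
termination_by l => l.length
decreasing_by
  have := List.length_dropWhile_le (· == x) t
  simp only [List.length_cons]
  omega

def format_classification_summary_alt (file_classifications : List (String × List String)) : String :=
  let cats := PySem.List.sorted (file_classifications.flatMap Prod.snd) (fun c => c)
  if cats = [] then "No files classified."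
  else PySem.Str.join "\n" ((altRuns cats).map (fun p => fmtLine p.1 p.2))

-- ===== PRECONDITION & SPEC =====
def Spec_format_classification_summary (file_classifications : List (String × List String)) (out : String) : Prop := out = format_classification_summary_alt file_classifications
instance (file_classifications : List (String × List String)) (out : String) : Decidable (Spec_format_classification_summary file_classifications out) := by unfold Spec_format_classification_summary; infer_instance

-- ===== CLAIM (what is proved, stated in full; the proofs are below) =====
def Claim_equal_format_classification_summary : Prop := ∀ (file_classifications : List (String × List String)), Dom_format_classification_summary file_classifications → Spec_format_classification_summary file_classifications (format_classification_summary file_classifications)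

-- ===== LEMMAS AND PROOFS =====

-- A's nested counting loop is Counter of the flattened category list
lemma counts_eq_counter (fc : List (String × List String)) :
    fc.foldl (fun d p => p.2.foldl (fun d c => d.modify c 0 (· + 1)) d)
      (PySem.Dict.empty : PySem.Dict String Int)
      = PySem.Dict.counter (fc.flatMap Prod.snd) := by
  rw [PySem.Dict.counter_eq_foldl]
  generalize (PySem.Dict.empty : PySem.Dict String Int) = d
  induction fc generalizing d with
  | nil => rfl
  | cons p t ih => simp [List.flatMap_cons, List.foldl_append, ih]

-- pointwise: the lexicographic pair comparison used by sorted2, applied to (k, g k)-pairs,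
-- is the plain comparison of the keys
lemma lex_pair (g : String → Int) (a b : String) :
    (decide (a < b) || (!decide (b < a) && decide (g a < g b))) = decide (a < b) := by
  by_cases h1 : a < b
  · simp [h1]
  · by_cases h2 : b < a
    · simp [h1, h2]
    · have : a = b := le_antisymm (not_lt.mp h2) (not_lt.mp h1)
      subst this
      simp

lemma insertBy_map_comm (g : String → Int) (x : String) (ys : List String) :
    PySem.List.insertBy
        (fun a b => decide (a.1 < b.1) || (!decide (b.1 < a.1) && decide (a.2 < b.2)))
        (x, g x) (ys.map (fun k => (k, g k)))
      = (PySem.List.insertBy (fun a b => decide (a < b)) x ys).map (fun k => (k, g k)) := by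
  induction ys with
  | nil => simp [PySem.List.insertBy]
  | cons y t ih =>
      simp only [List.map_cons, PySem.List.insertBy]
      rw [lex_pair g x y]
      by_cases h : x < y
      · simp [h]
      · rw [if_neg (by simp [h]), if_neg (by simp [h])]
        simp only [List.map_cons]
        rw [ih]

-- sorting the (key, count) pairs by tuple order is mapping over the sorted keys
lemma sorted2_map (g : String → Int) (l : List String) :
    PySem.List.sorted2 (l.map (fun k => (k, g k))) Prod.fst Prod.snd
      = (PySem.List.sorted l (fun k => k)).map (fun k => (k, g k)) := by
  rw [PySem.List.sorted_eq_foldl_insertBy]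
  show List.foldl _ [] (l.map (fun k => (k, g k))) = _
  rw [List.foldl_map]
  suffices h : ∀ acc : List String,
      l.foldl (fun acc k => PySem.List.insertBy
          (fun a b => decide (a.1 < b.1) || (!decide (b.1 < a.1) && decide (a.2 < b.2)))
          (k, g k) acc) (acc.map (fun k => (k, g k)))
        = (l.foldl (fun acc k => PySem.List.insertBy (fun a b => decide (a < b)) k acc) acc).map
            (fun k => (k, g k)) by
    simpa using h []
  induction l with
  | nil => intro acc; rfl
  | cons x t ih =>
      intro acc
      simp only [List.foldl_cons]
      rw [insertBy_map_comm g x acc]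
      exact ih _

-- PySem.Set.ofList keeps a subsequence of its input
lemma foldl_add_sublist (l acc : List String) :
    (l.foldl PySem.Set.add acc).Sublist (acc ++ l) := by
  induction l generalizing acc with
  | nil => simp
  | cons x t ih =>
      simp only [List.foldl_cons]
      refine (ih (PySem.Set.add acc x)).trans ?_
      have h : (PySem.Set.add acc x).Sublist (acc ++ [x]) := by
        unfold PySem.Set.add
        split
        · exact List.sublist_append_left acc [x]
        · exact List.Sublist.refl _
      simpa using h.append_right t

lemma ofList_sublist (l : List String) : (PySem.Set.ofList l).Sublist l := by
  simpa using foldl_add_sublist l []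

lemma add_cons_of_ne (y x : String) (s : List String) (h : y ≠ x) :
    PySem.Set.add (x :: s) y = x :: PySem.Set.add s y := by
  unfold PySem.Set.add PySem.Set.contains
  simp only [List.contains_cons]
  split <;> simp_all

-- an element in front of the accumulator, absent from the rest, stays in front
lemma foldl_add_cons (l : List String) (x : String) (hx : x ∉ l) :
    ∀ s : List String, l.foldl PySem.Set.add (x :: s) = x :: l.foldl PySem.Set.add s := by
  induction l with
  | nil => intro s; rfl
  | cons y t ih =>
      intro s
      have hyx : y ≠ x := fun h => hx (h ▸ List.mem_cons_self ..)
      have hxt : x ∉ t := fun h => hx (List.mem_cons_of_mem _ h)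
      simp only [List.foldl_cons]
      rw [add_cons_of_ne y x s hyx, ih hxt]

-- ofList of a sorted run: the head, its copies, then the distinct rest
lemma ofList_run (x : String) (a r : List String) (ha : ∀ y ∈ a, y = x) (hr : x ∉ r) :
    PySem.Set.ofList (x :: (a ++ r)) = x :: PySem.Set.ofList r := by
  unfold PySem.Set.ofList
  simp only [List.foldl_cons, List.foldl_append]
  have h0 : PySem.Set.add (PySem.Set.empty : PySem.Set String) x = [x] := rfl
  rw [h0]
  have h1 : a.foldl PySem.Set.add [x] = [x] := by
    induction a with
    | nil => rfl
    | cons y t ihh =>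
        have hy : y = x := ha y (List.mem_cons_self ..)
        have hyt : ∀ z ∈ t, z = x := fun z hz => ha z (List.mem_cons_of_mem _ hz)
        subst hy
        simp only [List.foldl_cons]
        have : PySem.Set.add [y] y = [y] := by
          unfold PySem.Set.add PySem.Set.contains
          simp
        rw [this]
        exact ihh hyt
  rw [h1]
  exact foldl_add_cons r x hr PySem.Set.empty

-- groupby of a sorted list: one pair (key, count) per distinct key, in order
lemma altRuns_sorted :
    ∀ (n : Nat) (ys : List String), ys.length ≤ n → ys.Pairwise (· ≤ ·) →
      altRuns ys = (PySem.Set.ofList ys).map (fun k => (k, (ys.count k : Int))) := by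
  intro n
  induction n with
  | zero =>
      intro ys hlen _
      have : ys = [] := List.eq_nil_of_length_eq_zero (Nat.le_zero.mp hlen)
      subst this
      simp [altRuns, PySem.Set.ofList, PySem.Set.empty]
  | succ n ih =>
      intro ys hlen hp
      match ys with
      | [] => simp [altRuns, PySem.Set.ofList, PySem.Set.empty]
      | x :: t =>
        have ht : t.takeWhile (· == x) ++ t.dropWhile (· == x) = t :=
          List.takeWhile_append_dropWhile
        have hpt : t.Pairwise (· ≤ ·) := hp.of_cons
        have hxle : ∀ y ∈ t, x ≤ y := fun y hy => List.rel_of_pairwise_cons hp hy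
        have ha : ∀ y ∈ t.takeWhile (· == x), y = x := fun y hy => by
          simpa using List.mem_takeWhile_imp hy
        have hrsub : (t.dropWhile (· == x)).Sublist t := List.dropWhile_sublist _
        have hpr : (t.dropWhile (· == x)).Pairwise (· ≤ ·) := hpt.sublist hrsub
        have hxr : x ∉ t.dropWhile (· == x) := by
          cases hrt : t.dropWhile (· == x) with
          | nil => simp
          | cons hd tl =>
            have hne : t.dropWhile (· == x) ≠ [] := by rw [hrt]; simp
            have hhd : ((t.dropWhile (· == x)).head hne == x) = false :=
              List.head_dropWhile_not (· == x) hne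
            have hdx : hd ≠ x := by
              have hheq : (t.dropWhile (· == x)).head hne = hd := by simp [hrt]
              rw [hheq] at hhd
              simpa using hhd
            have hdt : hd ∈ t := hrsub.mem (by rw [hrt]; exact List.mem_cons_self ..)
            intro hx
            rcases List.mem_cons.mp hx with h | h
            · exact hdx h.symm
            · have h1 : hd ≤ x := List.rel_of_pairwise_cons (hrt ▸ hpr) h
              have h2 : x ≤ hd := hxle hd hdt
              exact hdx (le_antisymm h1 h2)
        have hofl : PySem.Set.ofList (x :: t)
            = x :: PySem.Set.ofList (t.dropWhile (· == x)) := by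
          have h := ofList_run x _ _ ha hxr
          rw [ht] at h
          exact h
        have hlen_r : (t.dropWhile (· == x)).length ≤ n := by
          have h1 := List.length_dropWhile_le (· == x) t
          simp only [List.length_cons] at hlen
          omega
        have hIH := ih (t.dropWhile (· == x)) hlen_r hpr
        rw [altRuns, hIH, hofl, List.map_cons]
        refine congrArg₂ _ ?_ ?_
        · have h2 : t.count x = (t.takeWhile (· == x)).length := by
            conv_lhs => rw [← ht]
            rw [List.count_append, List.count_eq_length.mpr (fun b hb => (ha b hb).symm),
              List.count_eq_zero.mpr hxr, Nat.add_zero]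
          have hcx : (x :: t).count x = (t.takeWhile (· == x)).length + 1 := by
            rw [List.count_cons_self, h2]
          rw [hcx]
          simp [Prod.ext_iff]
          omega
        · apply List.map_congr_left
          intro k hk
          have hkr : k ∈ t.dropWhile (· == x) := (PySem.Set.mem_ofList _ k).mp hk
          have hkx : k ≠ x := fun h => hxr (h ▸ hkr)
          have hca : (t.takeWhile (· == x)).count k = 0 :=
            List.count_eq_zero.mpr (fun hka => hkx (ha k hka))
          have hck : (x :: t).count k = (t.dropWhile (· == x)).count k := by
            rw [List.count_cons_of_ne (Ne.symm hkx)]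
            conv_lhs => rw [← ht]
            rw [List.count_append, hca, Nat.zero_add]
          rw [hck]

-- ofList of a nonempty list is nonempty
lemma ofList_ne_nil (l : List String) (h : l ≠ []) : PySem.Set.ofList l ≠ [] := by
  match l with
  | [] => exact absurd rfl h
  | x :: t =>
      intro hnil
      have : x ∈ PySem.Set.ofList (x :: t) :=
        (PySem.Set.mem_ofList _ x).mpr (List.mem_cons_self ..)
      rw [hnil] at this
      exact absurd this (List.not_mem_nil)

-- ===== VERDICT (by name: the statement is the Claim_ definition above) =====
theorem format_classification_summary_spec : Claim_equal_format_classification_summary := by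
  intro fc _
  unfold Spec_format_classification_summary
  unfold format_classification_summary format_classification_summary_alt
  simp only [counts_eq_counter, PySem.Dict.size, PySem.Dict.items_counter]
  by_cases hc : fc.flatMap Prod.snd = []
  · simp [hc, PySem.List.sorted]
  · have hsne : PySem.List.sorted (fc.flatMap Prod.snd) (fun c => c) ≠ [] := by
      intro h
      exact hc ((PySem.List.sorted_eq_nil_iff _ _ _).mp h)
    have hone : ((PySem.Set.ofList (fc.flatMap Prod.snd)).map
        (fun k => (k, ((fc.flatMap Prod.snd).count k : Int)))).length ≠ 0 := by
      simp only [List.length_map]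
      intro h
      exact ofList_ne_nil _ hc (List.length_eq_zero_iff.mp h)
    rw [if_neg hone, if_neg hsne]
    rw [PySem.List.foldl_append_singleton_eq_map, List.nil_append]
    rw [sorted2_map (fun k => ((fc.flatMap Prod.snd).count k : Int))]
    rw [altRuns_sorted (PySem.List.sorted (fc.flatMap Prod.snd) (fun c => c)).length _
      le_rfl (PySem.List.sorted_pairwise _ _)]
    refine congrArg _ (congrArg _ ?_)
    -- sorted keys of the multiset = first occurrences of the sorted list, with equal counts
    have hperm : (PySem.Set.ofList (PySem.List.sorted (fc.flatMap Prod.snd) (fun c => c))).Perm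
        (PySem.Set.ofList (fc.flatMap Prod.snd)) := by
      refine (List.perm_ext_iff_of_nodup (PySem.Set.nodup_ofList _)
        (PySem.Set.nodup_ofList _)).mpr ?_
      intro a
      rw [PySem.Set.mem_ofList, PySem.Set.mem_ofList,
        (PySem.List.sorted_perm (fc.flatMap Prod.snd) (fun c => c) false).mem_iff]
    have hpw : (PySem.Set.ofList (PySem.List.sorted (fc.flatMap Prod.snd)
        (fun c => c))).Pairwise (· < ·) := by
      have h1 : (PySem.Set.ofList (PySem.List.sorted (fc.flatMap Prod.snd)
          (fun c => c))).Pairwise (· ≤ ·) :=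
        (PySem.List.sorted_pairwise (fc.flatMap Prod.snd) (fun c => c)).sublist
          (ofList_sublist _)
      have h2 := PySem.Set.nodup_ofList (PySem.List.sorted (fc.flatMap Prod.snd) (fun c => c))
      exact (h1.and h2).imp (fun h => lt_of_le_of_ne h.1 h.2)
    have hs : PySem.List.sorted (PySem.Set.ofList (fc.flatMap Prod.snd)) (fun k => k)
        = PySem.Set.ofList (PySem.List.sorted (fc.flatMap Prod.snd) (fun c => c)) :=
      PySem.List.sorted_eq_of_perm_of_pairwise_lt _ _ _ hperm hpw
    rw [hs]
    apply List.map_congr_left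
    intro k hk
    have : (PySem.List.sorted (fc.flatMap Prod.snd) (fun c => c)).count k
        = (fc.flatMap Prod.snd).count k :=
      (PySem.List.sorted_perm (fc.flatMap Prod.snd) (fun c => c) false).count_eq k
    rw [this]
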